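-- pv_equiv track=rewrite | github.com/Yuvrajsinghspd09/summer-of-code | IsBST_Traversal.py | isBSTTraversal
-- ===== SOURCE A (Python) =====
-- def isBSTTraversal(inorder):
--     # Step 1: Check for duplicate values
--     seen = set()
--     for num in inorder:
--         if num in seen:
--             return False
--         seen.add(num)
--
--     # Step 2: Check if the inorder traversal is sorted
--     for i in range(1, len(inorder)):
--         if inorder[i] < inorder[i - 1]:
--             return False
--
--     # If both conditions are met, it's a valid BST inorder traversal
--     return True
-- ===== SOURCE B (Python) =====
-- def isBSTTraversal(inorder):
--     # strictly increasing <=> no duplicates and non-decreasing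
--     return all(x < y for x, y in zip(inorder, inorder[1:]))
-- ===== Notes on version B (the rewrite author's own statement) =====
-- stated objective: simpler
-- what changed: Drops the hash-set duplicate pass and the index loop entirely: one zip over adjacent pairs checking strict increase, which subsumes both of A's checks.
import Mathlib
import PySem

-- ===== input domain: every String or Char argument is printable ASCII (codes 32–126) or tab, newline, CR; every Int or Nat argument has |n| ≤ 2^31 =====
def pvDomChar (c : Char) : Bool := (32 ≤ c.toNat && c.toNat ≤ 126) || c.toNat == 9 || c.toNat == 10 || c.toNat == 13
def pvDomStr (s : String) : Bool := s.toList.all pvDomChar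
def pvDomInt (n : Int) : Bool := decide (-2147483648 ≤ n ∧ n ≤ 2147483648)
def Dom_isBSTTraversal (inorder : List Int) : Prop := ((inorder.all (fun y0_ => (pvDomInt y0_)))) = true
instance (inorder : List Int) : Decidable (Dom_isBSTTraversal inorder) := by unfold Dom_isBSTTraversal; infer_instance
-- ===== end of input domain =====

-- B replaces A's set-based duplicate pass plus sortedness pass by a single
-- adjacent-pairs strict-increase check (simpler; same O(n) cost, no extra structure).

-- ===== PORT A =====
-- first loop: for num in inorder: if num in seen: return False; seen.add(num)
def pvALoop1 : List Int → PySem.Set Int → Bool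
  | [], _ => true
  | num :: rest, seen =>
      if PySem.Set.contains seen num then false
      else pvALoop1 rest (PySem.Set.add seen num)

-- second loop: for i in range(1, len(inorder)): if inorder[i] < inorder[i-1]: return False
-- (indices produced by range(1, len) are always in range, so pyGetD's default is never used)
def pvALoop2 (inorder : List Int) : List Int → Bool
  | [] => true
  | i :: rest =>
      if PySem.List.pyGetD inorder i 0 < PySem.List.pyGetD inorder (i - 1) 0 then false
      else pvALoop2 inorder rest

def isBSTTraversal (inorder : List Int) : Bool :=
  if pvALoop1 inorder PySem.Set.empty then
    pvALoop2 inorder (PySem.List.pyRange 1 (inorder.length : Int) 1)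
  else false

-- ===== PORT B =====
def isBSTTraversal_alt (inorder : List Int) : Bool :=
  (inorder.zip (PySem.List.slice inorder (some 1) none)).all (fun p => p.1 < p.2)

-- ===== PRECONDITION & SPEC =====
def Spec_isBSTTraversal (inorder : List Int) (out : Bool) : Prop := out = isBSTTraversal_alt inorder
instance (inorder : List Int) (out : Bool) : Decidable (Spec_isBSTTraversal inorder out) := by unfold Spec_isBSTTraversal; infer_instance

-- ===== CLAIM (what is proved, stated in full; the proofs are below) =====
def Claim_equal_isBSTTraversal : Prop := ∀ (inorder : List Int), Dom_isBSTTraversal inorder → Spec_isBSTTraversal inorder (isBSTTraversal inorder)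

-- ===== LEMMAS AND PROOFS =====

theorem pvALoop1_true_iff (l : List Int) : ∀ seen : PySem.Set Int,
    (pvALoop1 l seen = true ↔ l.Nodup ∧ ∀ x ∈ l, x ∉ seen) := by
  induction l with
  | nil => intro seen; simp [pvALoop1]
  | cons a rest ih =>
      intro seen
      by_cases h : a ∈ seen
      · simp only [pvALoop1, (PySem.Set.contains_iff seen a).mpr h, if_true]
        simp [h]
      · have hc : PySem.Set.contains seen a = false := by
          rw [Bool.eq_false_iff]
          simpa [PySem.Set.contains_iff] using h
        simp only [pvALoop1, hc, Bool.false_eq_true, if_false, ih, List.nodup_cons,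
          List.mem_cons]
        constructor
        · rintro ⟨hnd, hall⟩
          refine ⟨⟨fun hm => hall a hm ((PySem.Set.mem_add seen a a).mpr (Or.inr rfl)), hnd⟩,
            fun x hx => ?_⟩
          rcases hx with rfl | hx
          · exact h
          · exact fun hs => hall x hx ((PySem.Set.mem_add seen a x).mpr (Or.inl hs))
        · rintro ⟨⟨hna, hnd⟩, hall⟩
          refine ⟨hnd, fun x hx hmem => ?_⟩
          rcases (PySem.Set.mem_add seen a x).mp hmem with hs | rfl
          · exact hall x (Or.inr hx) hs
          · exact hna hx

theorem pvALoop2_true_iff (l : List Int) (is : List Int) :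
    pvALoop2 l is = true ↔
      ∀ i ∈ is, ¬ (PySem.List.pyGetD l i 0 < PySem.List.pyGetD l (i - 1) 0) := by
  induction is with
  | nil => simp [pvALoop2]
  | cons i rest ih =>
      simp only [pvALoop2]
      split_ifs with h
      · simp only [false_iff]
        intro hall
        exact hall i (by simp) h
      · simp only [ih, List.mem_cons]
        constructor
        · intro hall j hj
          rcases hj with rfl | hj
          · exact h
          · exact hall j hj
        · intro hall j hj
          exact hall j (Or.inr hj)

theorem alt_true_iff (l : List Int) :
    isBSTTraversal_alt l = true ↔ List.IsChain (· < ·) l := by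
  unfold isBSTTraversal_alt
  rw [PySem.List.slice_from_one]
  induction l with
  | nil => simp
  | cons a rest ih =>
      cases rest with
      | nil => simp
      | cons b t =>
          simp only [List.tail_cons, List.zip_cons_cons, List.all_cons, Bool.and_eq_true,
            decide_eq_true_eq, List.isChain_cons_cons] at *
          rw [ih]

theorem isChain_lt_pairwise : ∀ l : List Int, List.IsChain (· < ·) l → l.Pairwise (· < ·)
  | [], _ => by simp
  | [_], _ => by simp
  | a :: b :: t, h => by
      rw [List.isChain_cons_cons] at h
      have hp := isChain_lt_pairwise (b :: t) h.2
      refine List.pairwise_cons.mpr ⟨?_, hp⟩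
      intro x hx
      rcases List.mem_cons.mp hx with rfl | hx
      · exact h.1
      · exact lt_trans h.1 ((List.pairwise_cons.mp hp).1 x hx)

theorem isChain_lt_nodup (l : List Int) (h : List.IsChain (· < ·) l) : l.Nodup :=
  (isChain_lt_pairwise l h).imp fun hlt => ne_of_lt hlt

theorem a_true_iff (l : List Int) : isBSTTraversal l = true ↔ List.IsChain (· < ·) l := by
  unfold isBSTTraversal
  split_ifs with h1
  · have hnd : l.Nodup := ((pvALoop1_true_iff l PySem.Set.empty).mp h1).1
    rw [pvALoop2_true_iff]
    constructor
    · intro h2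
      rw [List.isChain_iff_getElem]
      intro k hk1
      have hmem : ((k : Int) + 1) ∈ PySem.List.pyRange 1 (l.length : Int) 1 := by
        rw [PySem.List.mem_pyRange_one]
        omega
      have hx := h2 _ hmem
      rw [PySem.List.pyGetD_eq_getElem l 0 (by omega) (by omega),
          PySem.List.pyGetD_eq_getElem l 0 (by omega) (by omega)] at hx
      have e1 : ((k : Int) + 1).toNat = k + 1 := by omega
      have e2 : ((k : Int) + 1 - 1).toNat = k := by omega
      have hx' : ¬ l[k + 1] < l[k] := by simpa [e1, e2] using hx
      have hne : l[k] ≠ l[k + 1] := by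
        intro he
        have : k = k + 1 := (List.Nodup.getElem_inj_iff hnd).mp he
        omega
      exact lt_of_le_of_ne (not_lt.mp hx') hne
    · intro hch i hi
      rw [PySem.List.mem_pyRange_one] at hi
      obtain ⟨hi1, hi2⟩ := hi
      have hlt : l[i.toNat - 1] < l[i.toNat - 1 + 1] :=
        List.isChain_iff_getElem.mp hch (i.toNat - 1) (by omega)
      rw [PySem.List.pyGetD_eq_getElem l 0 (by omega) (by omega),
          PySem.List.pyGetD_eq_getElem l 0 (by omega) (by omega)]
      have hlt' : l[i.toNat - 1]'(by omega) < l[i.toNat]'(by omega) := by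
        have e1 : i.toNat - 1 + 1 = i.toNat := by omega
        simpa [e1] using hlt
      have e2 : (i - 1).toNat = i.toNat - 1 := by omega
      simp only [e2]
      exact lt_asymm hlt'
  · simp only [false_iff]
    intro hch
    apply h1
    rw [pvALoop1_true_iff]
    exact ⟨isChain_lt_nodup l hch, by simp [PySem.Set.empty]⟩

-- ===== VERDICT (by name: the statement is the Claim_ definition above) =====
theorem isBSTTraversal_spec : Claim_equal_isBSTTraversal := by
  intro l _
  unfold Spec_isBSTTraversal
  have h := (a_true_iff l).trans (alt_true_iff l).symm
  cases hA : isBSTTraversal l with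
  | true => exact (h.mp hA).symm
  | false =>
      cases hB : isBSTTraversal_alt l with
      | true => exact absurd (h.mpr hB) (by simp [hA])
      | false => rfl
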